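-- pv_equiv track=rewrite | github.com/kevin00000000/geeksforgeeks-oj | easy/even_and_odd_elements_at_even_and_odd_positions.py | _odd_even_index
-- ===== SOURCE A (Python) =====
-- def _odd_even_index(array, length):
--     result = []
--     array_odd = []
--     array_even = []
--     for i in array:
--         if i % 2 == 0:
--             array_even.append(i)
--         else:
--             array_odd.append(i)
--     len_odd = len(array_odd)
--     len_even = len(array_even)
--     index_odd = 0
--     index_even = 0
--     index = 0
--     while index_odd < len_odd and index_even < len_even:
--         if index % 2 == 0:
--             result.append(array_even[index_even])
--             index_even += 1
--         else:
--             result.append(array_odd[index_odd])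
--             index_odd += 1
--         index += 1
--     if index_odd < len_odd:
--         result.extend(array_odd[index_odd:])
--     else:
--         result.extend(array_even[index_even:])
--     return result
-- ===== SOURCE B (Python) =====
-- def _odd_even_index(array, length):
--     s = sorted(array, key=lambda x: x % 2)      # stable: all evens first, then all odds
--     c = sum(1 for x in array if x % 2 == 0)     # number of evens = split point in s
--     m = min(c, len(array) - c)                  # number of complete (even, odd) pairs
--     head = [s[k // 2] if k % 2 == 0 else s[c + k // 2] for k in range(2 * m)]
--     tail = s[m:c] if c > m else s[c + m:]       # the leftover evens, or the leftover odds
--     return head + tail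
-- ===== Notes on version B (the rewrite author's own statement) =====
-- stated objective: alternative
-- what changed: Replaces A's partition pass plus three-cursor parity while-loop by one stable sort on the parity key (evens before odds, original order kept) followed by a closed-form index formula into the sorted list for the interleaved prefix and a slice for the remainder.
import Mathlib
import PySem

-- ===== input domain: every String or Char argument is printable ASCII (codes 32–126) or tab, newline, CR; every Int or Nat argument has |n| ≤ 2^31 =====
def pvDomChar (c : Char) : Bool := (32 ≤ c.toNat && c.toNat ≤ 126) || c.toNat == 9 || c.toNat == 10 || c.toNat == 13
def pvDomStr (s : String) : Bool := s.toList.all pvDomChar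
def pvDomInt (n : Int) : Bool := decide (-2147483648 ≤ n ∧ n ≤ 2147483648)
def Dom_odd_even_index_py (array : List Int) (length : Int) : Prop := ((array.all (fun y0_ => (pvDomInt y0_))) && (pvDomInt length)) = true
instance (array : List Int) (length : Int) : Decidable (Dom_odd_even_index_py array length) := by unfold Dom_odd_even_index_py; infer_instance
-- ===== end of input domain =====

-- B replaces A's partition pass + three-cursor parity while-loop by a single stable sort on the
-- parity key (evens land before odds, order preserved) followed by a direct index formula into
-- the sorted list (objective: alternative decomposition).

-- ===== PORT A =====
-- A's while loop: cursors index_even/index_odd into the two partitions, global index for parity.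
def pvLoopA (array_even array_odd : List Int) (index_even index_odd index : Nat)
    (result : List Int) : List Int :=
  if _h : index_odd < array_odd.length ∧ index_even < array_even.length then
    if index % 2 == 0 then
      pvLoopA array_even array_odd (index_even + 1) index_odd (index + 1)
        (result ++ [array_even.getD index_even 0])
    else
      pvLoopA array_even array_odd index_even (index_odd + 1) (index + 1)
        (result ++ [array_odd.getD index_odd 0])
  else if index_odd < array_odd.length then
    result ++ array_odd.drop index_odd
  else
    result ++ array_even.drop index_even
termination_by (array_odd.length - index_odd) + (array_even.length - index_even)
decreasing_by all_goals omega

def odd_even_index_py (array : List Int) (length : Int) : List Int :=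
  -- partition pass: state p = (array_odd, array_even), appended in A's branch order
  let p := array.foldl
    (fun (p : List Int × List Int) i =>
      if PySem.Int.mod i 2 == 0 then (p.1, p.2 ++ [i]) else (p.1 ++ [i], p.2))
    ([], [])
  pvLoopA p.2 p.1 0 0 0 []

-- ===== PORT B =====
-- s[k//2] / s[c + k//2] / s[m:c] / s[c+m:]: all indices are provably in range (k < 2*m and
-- m ≤ c ≤ len(s)), so pyGetD is exact here (Python raises only out of range).
def odd_even_index_py_alt (array : List Int) (length : Int) : List Int :=
  let s := PySem.List.sorted array (fun x => PySem.Int.mod x 2)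
  let c : Int := array.foldl (fun acc x => if PySem.Int.mod x 2 == 0 then acc + 1 else acc) 0
  let m : Int := min c ((array.length : Int) - c)
  let head := (PySem.List.pyRange 0 (2 * m)).map (fun k =>
      if PySem.Int.mod k 2 == 0 then PySem.List.pyGetD s (PySem.Int.floordiv k 2) 0
      else PySem.List.pyGetD s (c + PySem.Int.floordiv k 2) 0)
  let tail := if c > m then PySem.List.slice s (some m) (some c)
              else PySem.List.slice s (some (c + m)) none
  head ++ tail

-- ===== PRECONDITION & SPEC =====
def Spec_odd_even_index_py (array : List Int) (length : Int) (out : List Int) : Prop := out = odd_even_index_py_alt array length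
instance (array : List Int) (length : Int) (out : List Int) : Decidable (Spec_odd_even_index_py array length out) := by unfold Spec_odd_even_index_py; infer_instance

-- ===== CLAIM (what is proved, stated in full; the proofs are below) =====
def Claim_equal_odd_even_index_py : Prop := ∀ (array : List Int) (length : Int), Dom_odd_even_index_py array length → Spec_odd_even_index_py array length (odd_even_index_py array length)

-- ===== LEMMAS AND PROOFS =====

-- the common mathematical value: interleave with remainder
def pvMerge : List Int → List Int → List Int
  | [], os => os
  | es, [] => es
  | e :: es, o :: os => e :: o :: pvMerge es os

-- abbreviations used only in proofs
def pvEvens (l : List Int) : List Int := l.filter (fun x => PySem.Int.mod x 2 == 0)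
def pvOdds (l : List Int) : List Int := l.filter (fun x => PySem.Int.mod x 2 != 0)

@[simp] lemma pvMod_eq (x : Int) : PySem.Int.mod x 2 = x % 2 := by
  simp [PySem.Int.mod, Int.fmod_eq_emod]

lemma pvMod_cases (x : Int) : PySem.Int.mod x 2 = 0 ∨ PySem.Int.mod x 2 = 1 := by
  rw [pvMod_eq]; exact Int.emod_two_eq x

-- ---- A side ----

lemma pvPart_spec (l : List Int) : ∀ ao ae : List Int,
    l.foldl
      (fun (p : List Int × List Int) i =>
        if PySem.Int.mod i 2 == 0 then (p.1, p.2 ++ [i]) else (p.1 ++ [i], p.2))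
      (ao, ae)
    = (ao ++ pvOdds l, ae ++ pvEvens l) := by
  induction l with
  | nil => intro ao ae; simp [pvOdds, pvEvens]
  | cons x xs ih =>
    intro ao ae
    rw [List.foldl_cons]
    by_cases hx : (PySem.Int.mod x 2 == 0) = true
    · rw [if_pos hx, ih]
      have h0 : x % 2 = 0 := by simpa using hx
      simp [pvOdds, pvEvens, List.filter_cons, h0, Int.dvd_of_emod_eq_zero h0, bne]
    · rw [if_neg hx, ih]
      have h1 : x % 2 = 1 := by simp at hx; omega
      simp [pvOdds, pvEvens, List.filter_cons, h1, bne]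

lemma pvLoopA_spec : ∀ n : Nat, ∀ ae ao : List Int, ∀ io : Nat, ∀ res : List Int,
    (ao.length - io) + (ae.length - io) ≤ n →
    pvLoopA ae ao io io (2 * io) res = res ++ pvMerge (ae.drop io) (ao.drop io) := by
  intro n
  induction n with
  | zero =>
    intro ae ao io res hn
    have hae : ae.length ≤ io := by omega
    have hao : ao.length ≤ io := by omega
    rw [pvLoopA]
    simp [Nat.not_lt.mpr hao, List.drop_eq_nil_of_le hae, List.drop_eq_nil_of_le hao, pvMerge]
  | succ n ih =>
    intro ae ao io res hn
    by_cases hao : io < ao.length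
    · by_cases hae : io < ae.length
      · -- first step: append even
        rw [pvLoopA]
        have h2 : (2 * io) % 2 == 0 := by simp [Nat.mul_mod_right]
        simp only [hao, hae, and_self, dite_true, h2, if_true]
        -- second step: append odd (or exit if evens exhausted)
        rw [pvLoopA]
        have h3' : (2 * io + 1) % 2 = 1 := by omega
        have h3 : ¬ ((2 * io + 1) % 2 == 0) = true := by simp [h3']
        by_cases hae2 : io + 1 < ae.length
        · simp only [hao, hae2, and_self, dite_true, h3]
          have h4 : 2 * io + 1 + 1 = 2 * (io + 1) := by ring
          rw [h4, ih ae ao (io + 1) _ (by omega)]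
          rw [List.drop_eq_getElem_cons hae, List.drop_eq_getElem_cons hao]
          simp [pvMerge, List.getElem?_eq_getElem hae, List.getElem?_eq_getElem hao]
        · simp only [hae2, and_false, dite_false, hao, if_true]
          have hd : ae.drop (io + 1) = [] := List.drop_eq_nil_of_le (by omega)
          rw [List.drop_eq_getElem_cons hae, List.drop_eq_getElem_cons hao, hd]
          simp [pvMerge, List.getElem?_eq_getElem hae]
      · -- evens exhausted before the loop body runs
        rw [pvLoopA]
        have hd : ae.drop io = [] := List.drop_eq_nil_of_le (by omega)
        simp [hao, hae, hd, pvMerge]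
    · -- odds exhausted
      rw [pvLoopA]
      have hd : ao.drop io = [] := List.drop_eq_nil_of_le (by omega)
      simp [hao, hd]
      cases h : ae.drop io <;> simp [pvMerge]

lemma pvA_eq (array : List Int) (length : Int) :
    odd_even_index_py array length = pvMerge (pvEvens array) (pvOdds array) := by
  unfold odd_even_index_py
  rw [pvPart_spec]
  simp only [List.nil_append]
  have h0 : (2 : Nat) * 0 = 0 := by norm_num
  rw [← h0, pvLoopA_spec ((pvOdds array).length + (pvEvens array).length) _ _ 0 [] (by omega)]
  simp

-- ---- B side ----

-- the stable sort on the two-valued parity key is exactly "evens then odds"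
lemma pvInsert_even (x : Int) (hx : PySem.Int.mod x 2 = 0) :
    ∀ E O : List Int, (∀ e ∈ E, PySem.Int.mod e 2 = 0) → (∀ o ∈ O, PySem.Int.mod o 2 = 1) →
    PySem.List.insertBy
      (fun a b => decide (PySem.Int.mod a 2 < PySem.Int.mod b 2)) x (E ++ O)
    = E ++ x :: O := by
  intro E
  induction E with
  | nil =>
    intro O _ hO
    cases O with
    | nil => simp [PySem.List.insertBy]
    | cons o os =>
      have ho : o % 2 = 1 := by simpa using hO o (by simp)
      have hx' : x % 2 = 0 := by simpa using hx
      simp [PySem.List.insertBy, hx', ho]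
  | cons e E ih =>
    intro O hE hO
    have he : PySem.Int.mod e 2 = 0 := hE e (by simp)
    simp only [List.cons_append, PySem.List.insertBy, hx, he]
    rw [if_neg (by simp)]
    rw [ih O (fun a ha => hE a (by simp [ha])) hO]

lemma pvInsert_odd (x : Int) (hx : PySem.Int.mod x 2 = 1) (l : List Int) :
    PySem.List.insertBy
      (fun a b => decide (PySem.Int.mod a 2 < PySem.Int.mod b 2)) x l
    = l ++ [x] := by
  apply PySem.List.insertBy_of_forall_not_before
  intro y _
  have hx' : x % 2 = 1 := by simpa using hx
  rcases pvMod_cases y with h | h <;>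
    · have h' := h
      simp only [pvMod_eq] at h'
      simp [hx', h']

lemma pvSortFold_spec (l : List Int) : ∀ E O : List Int,
    (∀ e ∈ E, PySem.Int.mod e 2 = 0) → (∀ o ∈ O, PySem.Int.mod o 2 = 1) →
    l.foldl (fun acc x =>
        PySem.List.insertBy (fun a b => decide (PySem.Int.mod a 2 < PySem.Int.mod b 2)) x acc)
      (E ++ O)
    = (E ++ pvEvens l) ++ (O ++ pvOdds l) := by
  induction l with
  | nil => intro E O _ _; simp [pvEvens, pvOdds]
  | cons x xs ih =>
    intro E O hE hO
    rw [List.foldl_cons]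
    rcases pvMod_cases x with hx | hx
    · rw [pvInsert_even x hx E O hE hO]
      rw [show E ++ x :: O = (E ++ [x]) ++ O by simp]
      have hE' : ∀ a ∈ E ++ [x], PySem.Int.mod a 2 = 0 := by
        intro a ha
        rcases List.mem_append.mp ha with h | h
        · exact hE a h
        · simp at h; subst h; exact hx
      rw [ih (E ++ [x]) O hE' hO]
      have hx' : x % 2 = 0 := by simpa using hx
      simp [pvEvens, pvOdds, List.filter_cons, hx', Int.dvd_of_emod_eq_zero hx', bne]
    · rw [pvInsert_odd x hx, show (E ++ O) ++ [x] = E ++ (O ++ [x]) by simp]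
      have hO' : ∀ a ∈ O ++ [x], PySem.Int.mod a 2 = 1 := by
        intro a ha
        rcases List.mem_append.mp ha with h | h
        · exact hO a h
        · simp at h; subst h; exact hx
      rw [ih E (O ++ [x]) hE hO']
      have hx' : x % 2 = 1 := by simpa using hx
      simp [pvEvens, pvOdds, List.filter_cons, hx', bne]

lemma pvSorted_eq (array : List Int) :
    PySem.List.sorted array (fun x => PySem.Int.mod x 2)
    = pvEvens array ++ pvOdds array := by
  rw [PySem.List.sorted_eq_foldl_insertBy]
  have := pvSortFold_spec array [] [] (by simp) (by simp)
  simpa using this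

lemma pvCount_spec (l : List Int) : ∀ init : Int,
    l.foldl (fun acc x => if PySem.Int.mod x 2 == 0 then acc + 1 else acc) init
    = init + (pvEvens l).length := by
  induction l with
  | nil => intro init; simp [pvEvens]
  | cons x xs ih =>
    intro init
    rw [List.foldl_cons]
    by_cases hx : (PySem.Int.mod x 2 == 0) = true
    · rw [if_pos hx, ih]
      have hx' : x % 2 = 0 := by simpa using hx
      simp [pvEvens, List.filter_cons, hx', Int.dvd_of_emod_eq_zero hx']
      push_cast
      ring
    · rw [if_neg hx, ih]
      have hx' : x % 2 = 1 := by simp at hx; omega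
      simp [pvEvens, List.filter_cons, hx']

lemma pvLen_split (l : List Int) :
    (pvEvens l).length + (pvOdds l).length = l.length := by
  unfold pvEvens pvOdds
  exact (List.length_eq_length_filter_add (fun x => PySem.Int.mod x 2 == 0)).symm

lemma pvRange_map (n : Nat) : ∀ a : Int,
    PySem.List.pyRange a (a + n) = (List.range n).map (fun (k : Nat) => a + (k : Int)) := by
  induction n with
  | zero => intro a; simp [PySem.List.pyRange]
  | succ n ih =>
    intro a
    rw [PySem.List.pyRange_one_cons (by push_cast; omega)]
    rw [show a + ((n + 1 : Nat) : Int) = (a + 1) + (n : Int) by push_cast; ring]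
    rw [ih (a + 1), List.range_succ_eq_map, List.map_cons, List.map_map]
    congr 1
    · simp
    · apply List.map_congr_left
      intro k _
      simp only [Function.comp, Nat.succ_eq_add_one]
      push_cast
      ring

-- the interleave-by-index formula over two separated lists
def pvIlv (E O : List Int) (m : Nat) : List Int :=
  (List.range (2 * m)).map (fun k => if k % 2 = 0 then E.getD (k / 2) 0 else O.getD (k / 2) 0)

lemma pvIlv_merge : ∀ E O : List Int,
    pvIlv E O (min E.length O.length)
      ++ E.drop (min E.length O.length) ++ O.drop (min E.length O.length)
    = pvMerge E O := by
  intro E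
  induction E with
  | nil => intro O; simp [pvIlv, pvMerge]
  | cons e E ih =>
    intro O
    cases O with
    | nil => simp [pvIlv, pvMerge]
    | cons o O =>
      have hm : min (e :: E).length (o :: O).length = min E.length O.length + 1 := by
        simp [Nat.succ_min_succ]
      rw [hm]
      have hstep : pvIlv (e :: E) (o :: O) (min E.length O.length + 1)
          = e :: o :: pvIlv E O (min E.length O.length) := by
        unfold pvIlv
        have h2 : 2 * (min E.length O.length + 1) = (2 * min E.length O.length + 1) + 1 := by
          ring
        rw [h2, List.range_succ_eq_map, List.map_cons, List.map_map,
            List.range_succ_eq_map, List.map_cons, List.map_map]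
        norm_num [Function.comp, List.map_inj_left]
        intro k hk
        have hmod : (k + 1 + 1) % 2 = k % 2 := by omega
        have hdiv : (k + 1 + 1) / 2 = k / 2 + 1 := by omega
        rw [hmod, hdiv]
        by_cases hk2 : k % 2 = 0 <;> simp [hk2]
      rw [hstep]
      simp only [List.drop_succ_cons, pvMerge]
      rw [← ih O]
      simp

lemma pvB_eq (array : List Int) (length : Int) :
    odd_even_index_py_alt array length = pvMerge (pvEvens array) (pvOdds array) := by
  unfold odd_even_index_py_alt
  simp only []
  set E := pvEvens array with hE
  set O := pvOdds array with hO
  rw [pvSorted_eq, pvCount_spec]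
  simp only [Int.zero_add]
  have hlen : E.length + O.length = array.length := pvLen_split array
  set mN : Nat := min E.length O.length with hmN
  have hmint : min (E.length : Int) ((array.length : Int) - (E.length : Int)) = (mN : Int) := by
    have : (array.length : Int) - (E.length : Int) = (O.length : Int) := by
      push_cast [← hlen]; ring
    rw [this, hmN]; push_cast; omega
  rw [hmint]
  -- head
  have hrange : PySem.List.pyRange 0 (2 * (mN : Int))
      = (List.range (2 * mN)).map (fun (k : Nat) => (k : Int)) := by
    have h := pvRange_map (2 * mN) 0
    simp only [zero_add] at h
    rw [show (2 : Int) * (mN : Int) = ((2 * mN : Nat) : Int) by push_cast; ring, h]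
  have hhead : (PySem.List.pyRange 0 (2 * (mN : Int))).map (fun k =>
      if PySem.Int.mod k 2 == 0 then
        PySem.List.pyGetD (E ++ O) (PySem.Int.floordiv k 2) 0
      else PySem.List.pyGetD (E ++ O) ((E.length : Int) + PySem.Int.floordiv k 2) 0)
      = pvIlv E O mN := by
    rw [hrange, List.map_map]
    unfold pvIlv
    apply List.map_congr_left
    intro k hk
    have hklt : k < 2 * mN := List.mem_range.mp hk
    have hk2 : k / 2 < mN := by omega
    have hkE : k / 2 < E.length := lt_of_lt_of_le hk2 (by rw [hmN]; exact Nat.min_le_left _ _)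
    have hkO : k / 2 < O.length := lt_of_lt_of_le hk2 (by rw [hmN]; exact Nat.min_le_right _ _)
    simp only [Function.comp]
    have hmodk : PySem.Int.mod (k : Int) 2 = ((k % 2 : Nat) : Int) := by
      rw [pvMod_eq]
      exact_mod_cast (Int.natCast_mod k 2).symm
    have hdivk : PySem.Int.floordiv (k : Int) 2 = ((k / 2 : Nat) : Int) := by
      have hfd : PySem.Int.floordiv (k : Int) 2 = (k : Int) / 2 := by
        simp [PySem.Int.floordiv, Int.fdiv_eq_ediv]
      rw [hfd]
      exact_mod_cast (Int.natCast_div k 2).symm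
    rw [hmodk, hdivk]
    by_cases hkp : k % 2 = 0
    · rw [if_pos (by simp [hkp]), if_pos hkp, PySem.List.pyGetD_natCast]
      simp [List.getD, List.getElem?_append_left hkE]
    · rw [if_neg (by simp; omega), if_neg hkp]
      rw [show (E.length : Int) + ((k / 2 : Nat) : Int) = ((E.length + k / 2 : Nat) : Int) by
        push_cast; ring]
      rw [PySem.List.pyGetD_natCast]
      simp [List.getD, List.getElem?_append_right
        (by omega : E.length ≤ E.length + k / 2), List.getElem?_eq_getElem
        (by omega : E.length + k / 2 - E.length < O.length)]
  rw [hhead]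
  -- tail
  have htail : (if (E.length : Int) > (mN : Int) then
        PySem.List.slice (E ++ O) (some (mN : Int)) (some (E.length : Int))
      else PySem.List.slice (E ++ O) (some ((E.length : Int) + (mN : Int))) none)
      = E.drop mN ++ O.drop mN := by
    by_cases hcm : (E.length : Int) > (mN : Int)
    · rw [if_pos hcm, PySem.List.slice_natCast]
      have hmO : mN = O.length := by omega
      have hdrop : List.drop mN (E ++ O) = E.drop mN ++ O :=
        List.drop_append_of_le_length (by omega)
      rw [hdrop]
      have htake : List.take (E.length - mN) (E.drop mN ++ O) = E.drop mN := by
        apply List.take_left'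
        simp [List.length_drop]
      rw [htake, hmO]
      simp
    · rw [if_neg hcm]
      have hme : mN = E.length := by omega
      rw [show (E.length : Int) + (mN : Int) = ((E.length + mN : Nat) : Int) by push_cast; ring]
      rw [PySem.List.slice_from _ (by positivity)]
      rw [Int.toNat_natCast]
      have hdrop : List.drop (E.length + mN) (E ++ O) = O.drop mN :=
        List.drop_length_add_append mN
      rw [hdrop, hme]
      simp
  rw [htail, ← pvIlv_merge E O]
  simp [hmN]

-- ===== VERDICT (by name: the statement is the Claim_ definition above) =====
theorem odd_even_index_py_spec : Claim_equal_odd_even_index_py := by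
  intro array length _
  unfold Spec_odd_even_index_py
  rw [pvA_eq, pvB_eq]
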